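-- pv_equiv track=rewrite | github.com/Yaroslem15/TensorCalculator | tenzor-calculator/parser_t.py | qrix
-- ===== SOURCE A (Python) =====
-- def qrix(mass, R):
--     new_arr =  [[[[0 for l in range(R)] for k in range(R)] for j in range(R)] for i in range(R)]
--
--     index = 0
--     for i in range(R):
--         for j in range(R):
--             for k in range(R):
--                 for l in range(R):
--                     new_arr[i][j][k][l] = mass[index]
--                     index += 1
--     return(new_arr)
-- ===== SOURCE B (Python) =====
-- def qrix(mass, R):
--     def build(dims, offset):
--         if not dims:
--             return mass[offset]
--         d = dims[0]
--         rest = dims[1:]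
--         stride = 1
--         for x in rest:
--             stride *= x
--         return [build(rest, offset + i * stride) for i in range(d)]
--     return build([R, R, R, R], 0)
-- ===== Notes on version B (the rewrite author's own statement) =====
-- stated objective: alternative
-- what changed: B replaces A's allocate-zeros-then-mutate quadruple loop with a running counter by a recursive reshape over a dimension list [R,R,R,R]: build(dims, offset) returns mass[offset] on empty dims and otherwise collects build(rest, offset+i*stride) for i in range(dims[0]).
import Mathlib
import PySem

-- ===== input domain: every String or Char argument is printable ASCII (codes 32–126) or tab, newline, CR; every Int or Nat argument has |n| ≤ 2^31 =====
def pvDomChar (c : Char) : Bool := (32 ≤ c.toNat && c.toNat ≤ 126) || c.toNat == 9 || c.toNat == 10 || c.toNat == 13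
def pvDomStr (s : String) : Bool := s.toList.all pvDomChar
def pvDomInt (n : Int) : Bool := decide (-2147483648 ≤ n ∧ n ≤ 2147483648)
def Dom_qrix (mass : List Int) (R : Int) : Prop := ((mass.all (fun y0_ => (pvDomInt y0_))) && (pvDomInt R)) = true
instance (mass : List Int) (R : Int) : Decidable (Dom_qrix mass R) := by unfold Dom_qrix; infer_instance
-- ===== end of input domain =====

-- File claim: B reshapes by a recursive build over a dimension list instead of A's
-- mutate-in-place quadruple loop (objective: alternative; return values proved equal on Pre_).

-- ===== PORT A =====
-- A: allocate an R×R×R×R array of zeros, then a quadruple loop writes mass[index]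
-- into new_arr[i][j][k][l] with a running counter.  The in-place subscript
-- assignment new_arr[i][j][k][l] = mass[index] is rendered functionally, level by
-- level, as read-sub-array / update / write-back (pyGetD / pySetD); the .getD 0 on
-- pyGet? is unreachable under Pre_qrix (Python raises IndexError outside it).
def qrixBodyL (mass : List Int) (st : List Int × Int) (_l : Int) : List Int × Int :=
  (PySem.List.pySetD st.1 _l ((PySem.List.pyGet? mass st.2).getD 0), st.2 + 1)

def qrixBodyK (mass : List Int) (R : Int) (st : List (List Int) × Int) (k : Int) :
    List (List Int) × Int :=
  let sk := (PySem.List.pyRange 0 R 1).foldl (qrixBodyL mass) (PySem.List.pyGetD st.1 k [], st.2)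
  (PySem.List.pySetD st.1 k sk.1, sk.2)

def qrixBodyJ (mass : List Int) (R : Int) (st : List (List (List Int)) × Int) (j : Int) :
    List (List (List Int)) × Int :=
  let sj := (PySem.List.pyRange 0 R 1).foldl (qrixBodyK mass R) (PySem.List.pyGetD st.1 j [], st.2)
  (PySem.List.pySetD st.1 j sj.1, sj.2)

def qrixBodyI (mass : List Int) (R : Int) (st : List (List (List (List Int))) × Int) (i : Int) :
    List (List (List (List Int))) × Int :=
  let si := (PySem.List.pyRange 0 R 1).foldl (qrixBodyJ mass R) (PySem.List.pyGetD st.1 i [], st.2)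
  (PySem.List.pySetD st.1 i si.1, si.2)

def qrix (mass : List Int) (R : Int) : List (List (List (List Int))) :=
  let new_arr : List (List (List (List Int))) :=
    (PySem.List.pyRange 0 R 1).map (fun _ =>
      (PySem.List.pyRange 0 R 1).map (fun _ =>
        (PySem.List.pyRange 0 R 1).map (fun _ =>
          (PySem.List.pyRange 0 R 1).map (fun _ => (0 : Int)))))
  ((PySem.List.pyRange 0 R 1).foldl (qrixBodyI mass R) (new_arr, 0)).1

-- ===== PORT B =====
-- B: recursive reshape build(dims, offset): mass[offset] on empty dims, else
-- [build(rest, offset + i*stride) for i in range(dims[0])] with stride = product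
-- of rest.  Python's build is polymorphic in the recursion depth, so the Lean
-- port unrolls the recursion per level (Lean requires a homogeneous result type):
-- qrixLvl is one level of build, applied four times with the strides that the
-- Python loop 'for x in rest: stride *= x' computes for dims = [R,R,R,R].
-- mass[offset] is PySem.List.pyGet?; the .getD 0 is unreachable under Pre_qrix.
def qrixLvl {τ : Type} (sub : Int → τ) (d stride offset : Int) : List τ :=
  (PySem.List.pyRange 0 d 1).map (fun i => sub (offset + i * stride))

def qrix_alt (mass : List Int) (R : Int) : List (List (List (List Int))) :=
  qrixLvl (qrixLvl (qrixLvl (qrixLvl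
    (fun off => (PySem.List.pyGet? mass off).getD 0) R 1) R R) R (R * R)) R (R * R * R) 0

-- ===== PRECONDITION & SPEC =====
-- Pre_ excludes exactly the inputs on which Python A raises IndexError:
-- R ≥ 1 with fewer than R^4 elements in mass (B raises there too).
def Pre_qrix (mass : List Int) (R : Int) : Prop :=
  R ≤ 0 ∨ R * R * R * R ≤ (mass.length : Int)
instance (mass : List Int) (R : Int) : Decidable (Pre_qrix mass R) := by
  unfold Pre_qrix; infer_instance

def pvWitness_qrix : List Int × Int := ([5], 1)

def Spec_qrix (mass : List Int) (R : Int) (out : List (List (List (List Int)))) : Prop := out = qrix_alt mass R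
instance (mass : List Int) (R : Int) (out : List (List (List (List Int)))) : Decidable (Spec_qrix mass R out) := by unfold Spec_qrix; infer_instance

-- ===== CLAIM (what is proved, stated in full; the proofs are below) =====
def Claim_equal_qrix : Prop := ∀ (mass : List Int) (R : Int), Dom_qrix mass R → Pre_qrix mass R → Spec_qrix mass R (qrix mass R)

-- ===== LEMMAS AND PROOFS =====

-- offset part of a counter-threading fold: each step adds c, so r steps add r*c
theorem pv_fold_snd {τ : Type} (c : Int) (body : List τ × Int → Int → List τ × Int)
    (hbody : ∀ (st : List τ × Int) (t : Nat), (body st (t : Int)).2 = st.2 + c) :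
    ∀ (r : Nat) (xs : List τ) (off : Int),
      (((List.range r).map (fun k : Nat => (k : Int))).foldl body (xs, off)).2 = off + r * c := by
  intro r
  induction r with
  | zero => intro xs off; simp
  | succ n ih =>
    intro xs off
    rw [List.range_succ, List.map_append, List.foldl_append]
    simp only [List.map_cons, List.map_nil, List.foldl_cons, List.foldl_nil]
    rw [hbody, ih xs off]
    push_cast; ring

-- a fold whose body sets slot t to G off (old slot) and advances the counter by c
-- fills the first r slots with G at offsets off, off+c, …, off+(r-1)*c
theorem pv_fold_fill {τ : Type} (dflt : τ) (G : Int → τ → τ) (c : Int)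
    (body : List τ × Int → Int → List τ × Int)
    (hbody : ∀ (st : List τ × Int) (t : Nat),
      body st (t : Int) = (st.1.set t (G st.2 (st.1.getD t dflt)), st.2 + c)) :
    ∀ (r : Nat) (xs : List τ) (off : Int), r ≤ xs.length →
      ((List.range r).map (fun k : Nat => (k : Int))).foldl body (xs, off)
        = ((List.range r).map (fun t : Nat => G (off + (t : Int) * c) (xs.getD t dflt)) ++ xs.drop r,
           off + r * c) := by
  intro r
  induction r with
  | zero => intro xs off _; simp
  | succ n ih =>
    intro xs off h
    rw [List.range_succ, List.map_append, List.foldl_append]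
    simp only [List.map_cons, List.map_nil, List.foldl_cons, List.foldl_nil]
    rw [ih xs off (by omega), hbody]
    have hn : n < xs.length := by omega
    have hlen : ((List.range n).map (fun t : Nat => G (off + (t : Int) * c) (xs.getD t dflt))).length = n := by
      simp
    refine Prod.ext ?_ ?_
    · dsimp only
      rw [List.map_append, List.map_cons, List.map_nil]
      have hget : ((List.range n).map (fun t : Nat => G (off + (t : Int) * c) (xs.getD t dflt))
          ++ xs.drop n).getD n dflt = xs.getD n dflt := by
        unfold List.getD
        rw [List.getElem?_append_right (by simp)]
        simp [List.getElem?_drop]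
      rw [hget]
      have hdrop : xs.drop n = xs[n] :: xs.drop (n + 1) := List.drop_eq_getElem_cons hn
      rw [List.set_append_right n _ (by simp), hlen, Nat.sub_self, hdrop, List.set_cons_zero]
      simp
    · dsimp only
      push_cast; ring

-- proof-only helpers: the per-level "write one sub-array" functions and the zero templates
def pvGL (mass : List Int) (off : Int) (_x : Int) : Int := (PySem.List.pyGet? mass off).getD 0
def pvGK (mass : List Int) (r : Nat) (off : Int) (x : List Int) : List Int :=
  (((List.range r).map (fun k : Nat => (k : Int))).foldl (qrixBodyL mass) (x, off)).1
def pvGJ (mass : List Int) (R : Int) (r : Nat) (off : Int) (x : List (List Int)) : List (List Int) :=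
  (((List.range r).map (fun k : Nat => (k : Int))).foldl (qrixBodyK mass R) (x, off)).1
def pvGI (mass : List Int) (R : Int) (r : Nat) (off : Int) (x : List (List (List Int))) :
    List (List (List Int)) :=
  (((List.range r).map (fun k : Nat => (k : Int))).foldl (qrixBodyJ mass R) (x, off)).1
def pvZ1 (r : Nat) : List Int := (List.range r).map (fun _ => 0)
def pvZ2 (r : Nat) : List (List Int) := (List.range r).map (fun _ => pvZ1 r)
def pvZ3 (r : Nat) : List (List (List Int)) := (List.range r).map (fun _ => pvZ2 r)
def pvZ4 (r : Nat) : List (List (List (List Int))) := (List.range r).map (fun _ => pvZ3 r)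

theorem pv_bodyL (mass : List Int) : ∀ (st : List Int × Int) (t : Nat),
    qrixBodyL mass st (t : Int) = (st.1.set t (pvGL mass st.2 (st.1.getD t 0)), st.2 + 1) := by
  intro st t
  simp [qrixBodyL, pvGL]

theorem pv_bodyK (mass : List Int) (R : Int) (r : Nat)
    (hρ : PySem.List.pyRange 0 R 1 = (List.range r).map (fun k : Nat => (k : Int))) :
    ∀ (st : List (List Int) × Int) (t : Nat),
      qrixBodyK mass R st (t : Int)
        = (st.1.set t (pvGK mass r st.2 (st.1.getD t [])), st.2 + (r : Int)) := by
  intro st t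
  unfold qrixBodyK pvGK
  rw [hρ]
  refine Prod.ext ?_ ?_
  · dsimp only; simp
  · dsimp only
    rw [pv_fold_snd 1 (qrixBodyL mass) (fun st t => by simp [qrixBodyL]) r _ st.2]
    try ring

theorem pv_bodyJ (mass : List Int) (R : Int) (r : Nat)
    (hρ : PySem.List.pyRange 0 R 1 = (List.range r).map (fun k : Nat => (k : Int))) :
    ∀ (st : List (List (List Int)) × Int) (t : Nat),
      qrixBodyJ mass R st (t : Int)
        = (st.1.set t (pvGJ mass R r st.2 (st.1.getD t [])), st.2 + ((r : Int) * r)) := by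
  intro st t
  unfold qrixBodyJ pvGJ
  rw [hρ]
  refine Prod.ext ?_ ?_
  · dsimp only; simp
  · dsimp only
    rw [pv_fold_snd (r : Int) (qrixBodyK mass R)
      (fun st t => by rw [pv_bodyK mass R r hρ st t]) r _ st.2]

theorem pv_bodyI (mass : List Int) (R : Int) (r : Nat)
    (hρ : PySem.List.pyRange 0 R 1 = (List.range r).map (fun k : Nat => (k : Int))) :
    ∀ (st : List (List (List (List Int))) × Int) (t : Nat),
      qrixBodyI mass R st (t : Int)
        = (st.1.set t (pvGI mass R r st.2 (st.1.getD t [])), st.2 + ((r : Int) * r * r)) := by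
  intro st t
  unfold qrixBodyI pvGI
  rw [hρ]
  refine Prod.ext ?_ ?_
  · dsimp only; simp
  · dsimp only
    rw [pv_fold_snd ((r : Int) * r) (qrixBodyJ mass R)
      (fun st t => by rw [pv_bodyJ mass R r hρ st t]) r _ st.2]
    try ring

theorem pv_K_Z (mass : List Int) (r : Nat) : ∀ off : Int,
    pvGK mass r off (pvZ1 r)
      = (List.range r).map (fun l : Nat => (PySem.List.pyGet? mass (off + (l : Int) * 1)).getD 0) := by
  intro off
  unfold pvGK
  rw [pv_fold_fill 0 (pvGL mass) 1 (qrixBodyL mass) (pv_bodyL mass) r (pvZ1 r) off (by simp [pvZ1])]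
  dsimp only
  have hd : (pvZ1 r).drop r = [] := List.drop_eq_nil_of_le (by simp [pvZ1])
  rw [hd, List.append_nil]
  simp [pvGL]

theorem pv_J_Z (mass : List Int) (R : Int) (r : Nat)
    (hρ : PySem.List.pyRange 0 R 1 = (List.range r).map (fun k : Nat => (k : Int))) :
    ∀ off : Int, pvGJ mass R r off (pvZ2 r)
      = (List.range r).map (fun k : Nat => pvGK mass r (off + (k : Int) * r) (pvZ1 r)) := by
  intro off
  unfold pvGJ
  rw [pv_fold_fill [] (pvGK mass r) (r : Int) (qrixBodyK mass R) (pv_bodyK mass R r hρ) r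
    (pvZ2 r) off (by simp [pvZ2])]
  dsimp only
  have hd : (pvZ2 r).drop r = [] := List.drop_eq_nil_of_le (by simp [pvZ2])
  rw [hd, List.append_nil]
  refine List.map_congr_left ?_
  intro t ht
  have ht' : t < r := List.mem_range.mp ht
  simp [pvZ2, List.getD, ht']

theorem pv_I_Z (mass : List Int) (R : Int) (r : Nat)
    (hρ : PySem.List.pyRange 0 R 1 = (List.range r).map (fun k : Nat => (k : Int))) :
    ∀ off : Int, pvGI mass R r off (pvZ3 r)
      = (List.range r).map (fun j : Nat => pvGJ mass R r (off + (j : Int) * (r * r)) (pvZ2 r)) := by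
  intro off
  unfold pvGI
  rw [pv_fold_fill [] (pvGJ mass R r) ((r : Int) * r) (qrixBodyJ mass R) (pv_bodyJ mass R r hρ) r
    (pvZ3 r) off (by simp [pvZ3])]
  dsimp only
  have hd : (pvZ3 r).drop r = [] := List.drop_eq_nil_of_le (by simp [pvZ3])
  rw [hd, List.append_nil]
  refine List.map_congr_left ?_
  intro t ht
  have ht' : t < r := List.mem_range.mp ht
  simp [pvZ3, List.getD, ht']

-- ===== VERDICT (by name: the statement is the Claim_ definition above) =====
theorem qrix_spec : Claim_equal_qrix := by
  intro mass R _ _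
  show qrix mass R = qrix_alt mass R
  by_cases hR : R ≤ 0
  · simp [qrix, qrix_alt, qrixLvl, PySem.List.pyRange_one_eq_nil hR]
  · rw [not_le] at hR
    set r : Nat := R.toNat with hrdef
    have hr : (r : Int) = R := Int.toNat_of_nonneg hR.le
    have hρ : PySem.List.pyRange 0 R 1 = (List.range r).map (fun k : Nat => (k : Int)) := by
      rw [PySem.List.pyRange_one]
      simp [hrdef]
    -- A side
    unfold qrix
    rw [hρ]
    have hinit : (((List.range r).map (fun k : Nat => (k : Int))).map
        (fun _ => ((List.range r).map (fun k : Nat => (k : Int))).map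
          (fun _ => ((List.range r).map (fun k : Nat => (k : Int))).map
            (fun _ => ((List.range r).map (fun k : Nat => (k : Int))).map
              (fun _ => (0 : Int)))))) = pvZ4 r := by
      simp [pvZ4, pvZ3, pvZ2, pvZ1, List.map_map, Function.comp_def]
    rw [hinit]
    dsimp only
    rw [pv_fold_fill [] (pvGI mass R r) ((r : Int) * r * r) (qrixBodyI mass R)
      (pv_bodyI mass R r hρ) r (pvZ4 r) 0 (by simp [pvZ4])]
    dsimp only
    have hd : (pvZ4 r).drop r = [] := List.drop_eq_nil_of_le (by simp [pvZ4])
    rw [hd, List.append_nil]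
    -- B side
    unfold qrix_alt qrixLvl
    rw [hρ]
    simp only [List.map_map, Function.comp_def]
    -- compare the two nested closed forms entry by entry
    refine List.map_congr_left ?_
    intro i hi
    have hi' : i < r := List.mem_range.mp hi
    have hgd3 : (pvZ4 r).getD i [] = pvZ3 r := by
      simp [pvZ4, List.getD, hi']
    rw [hgd3, pv_I_Z mass R r hρ]
    refine List.map_congr_left ?_
    intro j hj
    rw [pv_J_Z mass R r hρ]
    refine List.map_congr_left ?_
    intro k hk
    rw [pv_K_Z mass r]
    refine List.map_congr_left ?_
    intro l hl
    refine congrArg (fun o => (PySem.List.pyGet? mass o).getD 0) ?_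
    rw [← hr]
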